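-- pv_equiv track=rewrite | github.com/zhenzhu143321/hxci-campus-portal-system | archive/test-scripts/comprehensive_school_test.py | generate_2023_accounts
-- ===== SOURCE A (Python) =====
-- def generate_2023_accounts(count=15):
--     """基于规律生成2023年级测试账号"""
--     accounts = []
--
--     # 已知模式: 2023010109, 2023010114, 2023010121
--     # 推测: 202301xxxx 格式，主要在100-130范围
--
--     base_numbers = [109, 114, 121]
--
--     # 在已知号码附近生成
--     for base in base_numbers:
--         for offset in range(-5, 6):
--             new_number = base + offset
--             if new_number > 100:  # 确保在合理范围
--                 account = f"2023010{new_number}"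
--                 if account not in accounts:
--                     accounts.append(account)
--
--     # 补充更多账号
--     for i in range(100, 140):
--         if len(accounts) >= count:
--             break
--         account = f"2023010{i}"
--         if account not in accounts:
--             accounts.append(account)
--
--     return accounts[:count]
-- ===== SOURCE B (Python) =====
-- def generate_2023_accounts(count=15):
--     """基于规律生成2023年级测试账号"""
--     candidates = [f"2023010{base + offset}"
--                   for base in (109, 114, 121)
--                   for offset in range(-5, 6)
--                   if base + offset > 100]
--     candidates += [f"2023010{i}" for i in range(100, 140)]
--     return list(dict.fromkeys(candidates))[:count]
-- ===== Notes on version B (the rewrite author's own statement) =====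
-- stated objective: simpler
-- what changed: Replaces A's two stateful loops with per-append membership scans and a running-length break by one build of the full candidate sequence, a single dict.fromkeys dedup, and a [:count] slice.
-- outside the precondition, e.g. on generate_2023_accounts(-39): A returns [], B returns ['2023010104']; on generate_2023_accounts(-38): A returns [], B returns ['2023010104', '2023010105']
import Mathlib
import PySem

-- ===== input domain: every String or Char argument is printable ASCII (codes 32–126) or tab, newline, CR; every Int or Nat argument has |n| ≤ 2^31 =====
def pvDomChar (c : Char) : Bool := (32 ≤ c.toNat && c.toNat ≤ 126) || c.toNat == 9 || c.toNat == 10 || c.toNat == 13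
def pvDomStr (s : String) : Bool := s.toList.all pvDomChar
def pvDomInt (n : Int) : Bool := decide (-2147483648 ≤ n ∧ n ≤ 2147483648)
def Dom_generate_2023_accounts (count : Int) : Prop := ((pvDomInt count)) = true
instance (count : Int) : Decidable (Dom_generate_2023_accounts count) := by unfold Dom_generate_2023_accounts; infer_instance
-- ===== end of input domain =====

-- B replaces A's two stateful loops (membership scan per append, running-length break) by
-- build-candidates → dedup (dict.fromkeys) → slice [:count]; objective: simpler.

-- ===== PORT A =====
-- second loop of A: 'for i in range(100, 140): if len(accounts) >= count: break; ...'
def pvLoop2 (count : Int) : List Int → List String → List String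
  | [], accounts => accounts
  | i :: rest, accounts =>
    if (accounts.length : Int) ≥ count then accounts
    else
      let account := "2023010" ++ PySem.Int.toStr i
      pvLoop2 count rest (if accounts.contains account then accounts else accounts ++ [account])

def generate_2023_accounts (count : Int) : List String :=
  let accounts : List String := []
  let base_numbers : List Int := [109, 114, 121]
  let accounts := base_numbers.foldl (fun accounts base =>
      (PySem.List.pyRange (-5) 6 1).foldl (fun accounts offset =>
        let new_number := base + offset
        if new_number > 100 then
          let account := "2023010" ++ PySem.Int.toStr new_number
          if accounts.contains account then accounts else accounts ++ [account]
        else accounts) accounts) accounts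
  let accounts := pvLoop2 count (PySem.List.pyRange 100 140 1) accounts
  PySem.List.slice accounts none (some count)

-- ===== PORT B =====
def generate_2023_accounts_alt (count : Int) : List String :=
  let candidates : List String :=
    ([109, 114, 121] : List Int).flatMap (fun base =>
      ((PySem.List.pyRange (-5) 6 1).filter (fun offset => base + offset > 100)).map
        (fun offset => "2023010" ++ PySem.Int.toStr (base + offset)))
  let candidates := candidates ++
    (PySem.List.pyRange 100 140 1).map (fun i => "2023010" ++ PySem.Int.toStr i)
  PySem.List.slice (PySem.List.dedup candidates) none (some count)

-- ===== PRECONDITION & SPEC =====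
-- Pre_ restricts to the natural domain of non-negative counts: on a negative count A's running-length
-- break fires at once and the negative slice then trims only A's shorter first-loop list, an accident
-- of its implementation, while B's negative slice trims the full deduped candidate sequence.
def Pre_generate_2023_accounts (count : Int) : Prop := 0 ≤ count
instance (count : Int) : Decidable (Pre_generate_2023_accounts count) := by
  unfold Pre_generate_2023_accounts; infer_instance

def pvWitness_generate_2023_accounts : Int := (15)

def Spec_generate_2023_accounts (count : Int) (out : List String) : Prop := out = generate_2023_accounts_alt count
instance (count : Int) (out : List String) : Decidable (Spec_generate_2023_accounts count out) := by unfold Spec_generate_2023_accounts; infer_instance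

-- ===== CLAIM (what is proved, stated in full; the proofs are below) =====
def Claim_equal_generate_2023_accounts : Prop := ∀ (count : Int), Dom_generate_2023_accounts count → Pre_generate_2023_accounts count → Spec_generate_2023_accounts count (generate_2023_accounts count)

-- ===== LEMMAS AND PROOFS =====

-- A's second loop with the break removed: the full no-break run.
def pvFull (r : List Int) (a : List String) : List String :=
  r.foldl (fun accounts i =>
    let account := "2023010" ++ PySem.Int.toStr i
    if accounts.contains account then accounts else accounts ++ [account]) a

theorem pvFull_prefix (r : List Int) (a : List String) : ∃ t, pvFull r a = a ++ t := by
  induction r generalizing a with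
  | nil => exact ⟨[], by simp [pvFull]⟩
  | cons i rest ih =>
    simp only [pvFull, List.foldl_cons]
    by_cases h : a.contains ("2023010" ++ PySem.Int.toStr i) = true
    · rw [if_pos h]
      exact ih a
    · rw [if_neg h]
      obtain ⟨t, ht⟩ := ih (a ++ ["2023010" ++ PySem.Int.toStr i])
      refine ⟨("2023010" ++ PySem.Int.toStr i) :: t, ?_⟩
      show pvFull rest (a ++ ["2023010" ++ PySem.Int.toStr i]) = _
      rw [ht]; simp

theorem pvLoop2_take (count : Int) (hc : 0 ≤ count) (r : List Int) (a : List String) :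
    (pvLoop2 count r a).take count.toNat = (pvFull r a).take count.toNat := by
  induction r generalizing a with
  | nil => rfl
  | cons i rest ih =>
    by_cases h : (a.length : Int) ≥ count
    · have hbreak : pvLoop2 count (i :: rest) a = a := by simp [pvLoop2, h]
      obtain ⟨t, ht⟩ := pvFull_prefix (i :: rest) a
      have hn : count.toNat ≤ a.length := by omega
      rw [hbreak, ht, List.take_append_of_le_length hn]
    · have hstep : pvLoop2 count (i :: rest) a =
          pvLoop2 count rest
            (if a.contains ("2023010" ++ PySem.Int.toStr i) then a
             else a ++ ["2023010" ++ PySem.Int.toStr i]) := by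
        simp [pvLoop2, h]
      have hfull : pvFull (i :: rest) a =
          pvFull rest
            (if a.contains ("2023010" ++ PySem.Int.toStr i) then a
             else a ++ ["2023010" ++ PySem.Int.toStr i]) := by
        simp [pvFull]
      rw [hstep, hfull, ih]

-- pvFull is a fold of Python set-add over the generated account strings
theorem pvFull_eq (r : List Int) (a : List String) :
    pvFull r a = (r.map (fun i => "2023010" ++ PySem.Int.toStr i)).foldl PySem.Set.add a := by
  rw [List.foldl_map]; rfl

-- A's inner offset loop equals a set-add fold over B's filtered-and-mapped candidates
theorem pvInner (base : Int) (acc : List String) :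
    (PySem.List.pyRange (-5) 6 1).foldl (fun accounts offset =>
        let new_number := base + offset
        if new_number > 100 then
          let account := "2023010" ++ PySem.Int.toStr new_number
          if accounts.contains account then accounts else accounts ++ [account]
        else accounts) acc
      = (((PySem.List.pyRange (-5) 6 1).filter (fun offset => base + offset > 100)).map
          (fun offset => "2023010" ++ PySem.Int.toStr (base + offset))).foldl PySem.Set.add acc := by
  rw [List.foldl_map, ← PySem.List.foldl_ite_eq_foldl_filter]
  rfl

-- the two closed candidate computations agree
theorem pvMain :
    pvFull (PySem.List.pyRange 100 140 1)
      (([109, 114, 121] : List Int).foldl (fun accounts base =>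
        (PySem.List.pyRange (-5) 6 1).foldl (fun accounts offset =>
          let new_number := base + offset
          if new_number > 100 then
            let account := "2023010" ++ PySem.Int.toStr new_number
            if accounts.contains account then accounts else accounts ++ [account]
          else accounts) accounts) [])
    = PySem.List.dedup
        ((([109, 114, 121] : List Int).flatMap (fun base =>
            ((PySem.List.pyRange (-5) 6 1).filter (fun offset => base + offset > 100)).map
              (fun offset => "2023010" ++ PySem.Int.toStr (base + offset)))) ++
          (PySem.List.pyRange 100 140 1).map (fun i => "2023010" ++ PySem.Int.toStr i)) := by
  have h1 : ([109, 114, 121] : List Int).foldl (fun accounts base =>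
        (PySem.List.pyRange (-5) 6 1).foldl (fun accounts offset =>
          let new_number := base + offset
          if new_number > 100 then
            let account := "2023010" ++ PySem.Int.toStr new_number
            if accounts.contains account then accounts else accounts ++ [account]
          else accounts) accounts) []
      = (([109, 114, 121] : List Int).flatMap (fun base =>
          ((PySem.List.pyRange (-5) 6 1).filter (fun offset => base + offset > 100)).map
            (fun offset => "2023010" ++ PySem.Int.toStr (base + offset)))).foldl
          PySem.Set.add [] := by
    simp only [List.foldl_cons, List.foldl_nil, List.flatMap_cons, List.flatMap_nil,
      List.append_nil, List.foldl_append, pvInner]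
  rw [pvFull_eq, h1, PySem.List.dedup_eq_ofList, PySem.Set.ofList_eq_foldl, List.foldl_append]

-- ===== VERDICT (by name: the statement is the Claim_ definition above) =====
set_option maxRecDepth 40000 in
theorem generate_2023_accounts_spec : Claim_equal_generate_2023_accounts := by
  intro count _ hpre
  unfold Pre_generate_2023_accounts at hpre
  unfold Spec_generate_2023_accounts
  simp only [generate_2023_accounts, generate_2023_accounts_alt]
  rw [PySem.List.slice_to _ hpre, PySem.List.slice_to _ hpre, pvLoop2_take count hpre, pvMain]
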